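-- pv_equiv track=rewrite | github.com/rsierrav/Phase2_Group112 | src/init.py | choose_primary_url
-- ===== SOURCE A (Python) =====
-- def choose_primary_url(urls):
--     """Choose the primary URL from a list (prefer MODEL > DATASET > CODE)."""
--     # look for models
--     for url in urls:
--         if "huggingface.co" in url and (
--             "/" in url.split("huggingface.co/")[-1] and "/datasets/" not in url
--         ):
--             return url
--     # look for datasets
--     for url in urls:
--         if "huggingface.co/datasets" in url:
--             return url
--     # look for code
--     for url in urls:
--         if "github.com" in url:
--             return url
--     # Fallback to first URL
--     return urls[0] if urls else None
-- ===== SOURCE B (Python) =====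
-- def choose_primary_url(urls):
--     """Choose the primary URL from a list (prefer MODEL > DATASET > CODE)."""
--     dataset = None
--     code = None
--     for url in urls:
--         if "huggingface.co" in url and (
--             "/" in url.split("huggingface.co/")[-1] and "/datasets/" not in url
--         ):
--             return url
--         if dataset is None and "huggingface.co/datasets" in url:
--             dataset = url
--         if code is None and "github.com" in url:
--             code = url
--     if dataset is not None:
--         return dataset
--     if code is not None:
--         return code
--     return urls[0] if urls else None
-- ===== Notes on version B (the rewrite author's own statement) =====
-- stated objective: simpler
-- what changed: Replaces A's three sequential scans over urls with one single pass that returns a model URL immediately and remembers the first dataset and first code URL for the fallback chain.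
import Mathlib
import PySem

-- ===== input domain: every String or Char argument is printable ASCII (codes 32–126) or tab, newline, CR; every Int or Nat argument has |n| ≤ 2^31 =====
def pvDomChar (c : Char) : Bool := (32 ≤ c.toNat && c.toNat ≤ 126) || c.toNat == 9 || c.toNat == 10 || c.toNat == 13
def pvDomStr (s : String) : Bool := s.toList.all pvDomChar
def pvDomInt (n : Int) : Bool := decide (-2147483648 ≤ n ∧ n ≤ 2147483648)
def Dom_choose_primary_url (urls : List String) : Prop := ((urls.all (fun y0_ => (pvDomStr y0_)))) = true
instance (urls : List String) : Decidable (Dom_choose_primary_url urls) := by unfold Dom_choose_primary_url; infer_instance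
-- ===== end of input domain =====

-- B replaces A's three sequential scans with one single pass; objective: simpler.

-- ===== PORT A =====
-- shared predicates (verbatim from the Python conditions; used by both ports)
-- url.split("huggingface.co/")[-1] : the separator is nonempty so split? is always `some`;
-- [-1] on the (always nonempty) result is its last element.
def pvSplitLast (url : String) : String :=
  (PySem.Str.split? url "huggingface.co/").getD [] |>.getLastD ""

def pvIsModel (url : String) : Bool :=
  PySem.Str.isIn "huggingface.co" url &&
    (PySem.Str.isIn "/" (pvSplitLast url) && !PySem.Str.isIn "/datasets/" url)

def pvIsDataset (url : String) : Bool :=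
  PySem.Str.isIn "huggingface.co/datasets" url

def pvIsCode (url : String) : Bool :=
  PySem.Str.isIn "github.com" url

-- A's first loop: first model URL
def pvLoopModel : List String → Option String
  | [] => none
  | u :: rest => if pvIsModel u then some u else pvLoopModel rest

-- A's second loop: first dataset URL
def pvLoopDataset : List String → Option String
  | [] => none
  | u :: rest => if pvIsDataset u then some u else pvLoopDataset rest

-- A's third loop: first code URL
def pvLoopCode : List String → Option String
  | [] => none
  | u :: rest => if pvIsCode u then some u else pvLoopCode rest

def choose_primary_url (urls : List String) : Option String :=
  match pvLoopModel urls with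
  | some u => some u
  | none =>
    match pvLoopDataset urls with
    | some u => some u
    | none =>
      match pvLoopCode urls with
      | some u => some u
      | none => urls.head?   -- urls[0] if urls else None

-- ===== PORT B =====
-- single pass: return a model immediately, remember first dataset and first code
def pvGo : List String → Option String → Option String → Option String
  | [], dataset, code =>
    match dataset with
    | some d => some d
    | none => code
  | u :: rest, dataset, code =>
    if pvIsModel u then some u
    else
      pvGo rest
        (if dataset.isNone && pvIsDataset u then some u else dataset)
        (if code.isNone && pvIsCode u then some u else code)

def choose_primary_url_alt (urls : List String) : Option String :=
  match pvGo urls none none with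
  | some u => some u
  | none => urls.head?   -- urls[0] if urls else None

-- ===== PRECONDITION & SPEC =====
def Spec_choose_primary_url (urls : List String) (out : Option String) : Prop := out = choose_primary_url_alt urls
instance (urls : List String) (out : Option String) : Decidable (Spec_choose_primary_url urls out) := by unfold Spec_choose_primary_url; infer_instance

-- ===== CLAIM (what is proved, stated in full; the proofs are below) =====
def Claim_equal_choose_primary_url : Prop := ∀ (urls : List String), Dom_choose_primary_url urls → Spec_choose_primary_url urls (choose_primary_url urls)

-- ===== LEMMAS AND PROOFS =====

-- loop invariant: the single pass with accumulators equals the model/dataset/code priority chain,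
-- where an already-remembered dataset/code takes precedence over later finds
theorem pvGo_eq (urls : List String) : ∀ (ds cs : Option String),
    pvGo urls ds cs =
      match pvLoopModel urls with
      | some u => some u
      | none =>
        match ds with
        | some d => some d
        | none =>
          match pvLoopDataset urls with
          | some u => some u
          | none =>
            match cs with
            | some c => some c
            | none => pvLoopCode urls := by
  induction urls with
  | nil => intro ds cs; cases ds <;> cases cs <;> simp [pvGo, pvLoopModel, pvLoopDataset, pvLoopCode]
  | cons u rest ih =>
    intro ds cs
    simp only [pvGo, pvLoopModel, pvLoopDataset, pvLoopCode]
    by_cases hm : pvIsModel u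
    · simp [hm]
    · simp only [hm, ih]
      cases ds <;> cases cs <;>
        by_cases hd : pvIsDataset u <;> by_cases hc : pvIsCode u <;>
          simp [hd, hc]

-- ===== VERDICT (by name: the statement is the Claim_ definition above) =====
theorem choose_primary_url_spec : Claim_equal_choose_primary_url := by
  intro urls _
  unfold Spec_choose_primary_url choose_primary_url choose_primary_url_alt
  rw [pvGo_eq]
  cases pvLoopModel urls <;> cases pvLoopDataset urls <;> cases pvLoopCode urls <;> simp
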